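-- pv_equiv track=rewrite | github.com/nastya-pa/my_homework | 4.10.21 2.py | net
-- ===== SOURCE A (Python) =====
-- def net(data):
--     processed_data = []
--     lists = []
--     answ = ''
--     for i in range(len(data)):
--         a = data.find(data[i])
--         lists.append(a)
--         f = lists.pop(0)
--         b = data.find(data[i], int(f)+1)
--         processed_data.append(data[a:b+1:])
--         processed_data.sort(key=len)
--         answ = processed_data[::-1]
--     return answ[:1]
-- ===== SOURCE B (Python) =====
-- def net(data):
--     first = {}
--     second = {}
--     for i, c in enumerate(data):
--         if c not in first:
--             first[c] = i
--         elif c not in second: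
--             second[c] = i
--     best_lo, best_hi = 0, -1
--     for c in data:
--         if c in second:
--             lo, hi = first[c], second[c]
--         else:
--             lo, hi = 0, -1
--         if hi - lo >= best_hi - best_lo:
--             best_lo, best_hi = lo, hi
--     return [data[best_lo:best_hi + 1]]
-- ===== Notes on version B (the rewrite author's own statement) =====
-- stated objective: faster
-- what changed: B precomputes the first and second occurrence index of every character in one dict-building pass, then a single scan keeps the best (first,second) index pair with a >=-update (which reproduces A's last-max tie-break) and slices once at the end, instead of A's per-index find/find-again, re-sorting the whole candidate list by length and reversing it on every iteration.
-- outside the precondition, e.g. on net(''): A returns '', B returns ['']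
import Mathlib
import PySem

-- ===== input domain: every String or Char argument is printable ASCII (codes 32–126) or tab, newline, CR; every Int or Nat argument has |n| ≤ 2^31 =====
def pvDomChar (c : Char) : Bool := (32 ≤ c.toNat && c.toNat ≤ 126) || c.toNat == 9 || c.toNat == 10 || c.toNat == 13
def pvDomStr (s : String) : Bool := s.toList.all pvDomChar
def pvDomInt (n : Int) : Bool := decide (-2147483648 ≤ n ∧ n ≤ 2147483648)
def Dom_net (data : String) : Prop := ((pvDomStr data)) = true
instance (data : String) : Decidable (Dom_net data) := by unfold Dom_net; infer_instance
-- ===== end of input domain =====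

-- B replaces A's per-index find/re-sort/reverse loop by one dict pass recording first/second
-- occurrence per char and a single running-max scan (>= keeps A's last-max tie-break): faster.

-- ===== PORT A =====
-- one iteration of A's loop; state = (processed_data, lists, answ); strings as List Char
def netStep (cs : List Char) (st : List (List Char) × List Int × List (List Char)) (i : Int) :
    List (List Char) × List Int × List (List Char) :=
  let c := (PySem.List.pyGet? cs i).getD ' '      -- data[i]; i always in range
  let a := PySem.Chars.find cs [c]                -- data.find(data[i])
  let lists1 := st.2.1 ++ [a]                     -- lists.append(a)
  let fr := (PySem.List.pop? lists1 0).getD (-1, [])  -- f = lists.pop(0); never none (lists1 ≠ [])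
  let b := PySem.Chars.findFrom cs [c] (fr.1 + 1) none -- data.find(data[i], int(f)+1); int(f) = f
  let processed1 := PySem.List.sorted
      (st.1 ++ [PySem.List.slice cs (some a) (some (b + 1))])   -- append data[a:b+1]; sort(key=len)
      (fun s => PySem.Chars.len s) false
  (processed1, fr.2, (PySem.List.slice? processed1 none none (-1)).getD [])  -- answ = processed[::-1]

def net (data : String) : List String :=
  let cs := data.toList
  let st := (PySem.List.pyRange 0 (PySem.Chars.len cs) 1).foldl (netStep cs) ([], [], [])
  (PySem.List.slice st.2.2 none (some 1)).map (fun l => String.ofList l)   -- return answ[:1]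

-- ===== PORT B =====
-- dict-building pass: first/second occurrence index per char
def netAltScan (st : PySem.Dict Char Int × PySem.Dict Char Int) (p : Int × Char) :
    PySem.Dict Char Int × PySem.Dict Char Int :=
  if st.1.contains p.2 = false then (st.1.insert p.2 p.1, st.2)
  else if st.2.contains p.2 = false then (st.1, st.2.insert p.2 p.1)
  else st

-- one step of B's best-candidate scan; b = (best_lo, best_hi)
def netAltBest (F S : PySem.Dict Char Int) (b : Int × Int) (c : Char) : Int × Int :=
  let p := if S.contains c then (F.getD c 0, S.getD c 0) else ((0 : Int), (-1 : Int))
  if b.2 - b.1 ≤ p.2 - p.1 then p else b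

def net_alt (data : String) : List String :=
  let cs := data.toList
  let fs := (PySem.List.enumerate cs 0).foldl netAltScan (PySem.Dict.empty, PySem.Dict.empty)
  let best := cs.foldl (netAltBest fs.1 fs.2) (0, -1)
  [String.ofList (PySem.List.slice cs (some best.1) (some (best.2 + 1)))]

-- ===== PRECONDITION & SPEC =====
-- Pre_ excludes only the empty string, on which A returns '' — a str, not the declared list type.
def Pre_net (data : String) : Prop := data ≠ ""
instance (data : String) : Decidable (Pre_net data) := by unfold Pre_net; infer_instance
def pvWitness_net : String := "aba"

def Spec_net (data : String) (out : List String) : Prop := out = net_alt data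
instance (data : String) (out : List String) : Decidable (Spec_net data out) := by unfold Spec_net; infer_instance

-- ===== CLAIM (what is proved, stated in full; the proofs are below) =====
def Claim_equal_net : Prop := ∀ (data : String), Dom_net data → Pre_net data → Spec_net data (net data)

-- ===== LEMMAS AND PROOFS =====

-- occurrence indices of c in cs, numbered from s
def occs (cs : List Char) (c : Char) (s : Int) : List Int :=
  match cs with
  | [] => []
  | x :: t => if x = c then s :: occs t c (s + 1) else occs t c (s + 1)

-- A's candidate substring for character c: first to second occurrence (as A's slice computes it)
def candA (cs : List Char) (c : Char) : List Char :=
  PySem.List.slice cs (some ((occs cs c 0).head?.getD (-1)))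
    (some ((occs cs c 0).tail.head?.getD (-1) + 1))

-- B's candidate pair for character c
def pairS (cs : List Char) (c : Char) : Int × Int :=
  match occs cs c 0 with
  | a :: b :: _ => (a, b)
  | _ => (0, -1)

-- B's final slice of a pair
def toCand (cs : List Char) (p : Int × Int) : List Char :=
  PySem.List.slice cs (some p.1) (some (p.2 + 1))

theorem occs_eq_nil_iff (cs : List Char) (c : Char) (s : Int) :
    occs cs c s = [] ↔ c ∉ cs := by
  induction cs generalizing s with
  | nil => simp [occs]
  | cons x t ih =>
    by_cases hx : x = c
    · subst hx; simp [occs]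
    · simp [occs, hx, ih, Ne.symm hx]

theorem occs_shift (cs : List Char) (c : Char) (s : Int) :
    occs cs c s = (occs cs c 0).map (· + s) := by
  induction cs generalizing s with
  | nil => simp [occs]
  | cons x t ih =>
    by_cases hx : x = c <;>
      simp [occs, hx, ih (s+1), ih 1, List.map_map] <;>
      exact fun a _ => by ring

theorem occs_mem_bounds {cs : List Char} {c : Char} {s k : Int} (h : k ∈ occs cs c s) :
    s ≤ k ∧ k < s + cs.length := by
  induction cs generalizing s with
  | nil => simp [occs] at h
  | cons x t ih =>
    by_cases hx : x = c
    · rw [occs, if_pos hx] at h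
      rcases List.mem_cons.mp h with rfl | h2
      · simp only [List.length_cons]; push_cast; omega
      · have := ih h2; simp only [List.length_cons] at *; push_cast at this ⊢; omega
    · rw [occs, if_neg hx] at h
      have := ih h; simp only [List.length_cons] at *; push_cast at this ⊢; omega

theorem occs_head_spec {cs : List Char} {c : Char} {s a : Int} {rest : List Int}
    (h : occs cs c s = a :: rest) :
    ∃ j : Nat, a = s + j ∧ cs[j]? = some c ∧ (∀ i < j, cs[i]? ≠ some c) ∧
      rest = occs (cs.drop (j + 1)) c (s + j + 1) := by
  induction cs generalizing s a rest with
  | nil => simp [occs] at h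
  | cons x t ih =>
    by_cases hx : x = c
    · subst hx
      simp [occs] at h
      refine ⟨0, by omega, by simp, by omega, ?_⟩
      simp [← h.2]
    · simp [occs, hx] at h
      obtain ⟨j, hj1, hj2, hj3, hj4⟩ := ih h
      refine ⟨j + 1, by push_cast; omega, by simpa using hj2, ?_, ?_⟩
      · intro i hi
        cases i with
        | zero => simpa using hx
        | succ i => simpa using hj3 i (by omega)
      · simpa [add_assoc, add_comm, add_left_comm] using hj4

theorem singleton_prefix_iff (c : Char) (l : List Char) :
    [c] <+: l ↔ l.head? = some c := by
  cases l with
  | nil => simp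
  | cons x t =>
    constructor
    · rintro ⟨r, hr⟩; simp at hr; simp [hr.1]
    · intro h; simp at h; exact ⟨t, by simp [h]⟩

theorem find_occs (cs : List Char) (c : Char) :
    PySem.Chars.find cs [c] = ((occs cs c 0).head?).getD (-1) := by
  rcases lt_or_ge (PySem.Chars.find cs [c]) 0 with hneg | hpos
  · have h1 : PySem.Chars.find cs [c] = -1 := by
      have := PySem.Chars.neg_one_le_find cs [c]; omega
    have : ¬ [c] <:+: cs := (PySem.Chars.find_eq_neg_one_iff cs [c]).mp h1
    have hc : c ∉ cs := fun hm => this ((List.singleton_infix_iff c cs).mpr hm)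
    rw [h1, (occs_eq_nil_iff cs c 0).mpr hc]; rfl
  · obtain ⟨hpre, hmin⟩ := PySem.Chars.find_spec hpos
    set J := (PySem.Chars.find cs [c]).toNat with hJ
    have hJc : cs[J]? = some c := by
      rw [← List.head?_drop]; exact (singleton_prefix_iff c _).mp hpre
    have hJmin : ∀ i < J, cs[i]? ≠ some c := by
      intro i hi hic
      exact hmin i hi ((singleton_prefix_iff c _).mpr (by rw [List.head?_drop]; exact hic))
    cases hocc : occs cs c 0 with
    | nil =>
      exfalso
      have hc : c ∉ cs := (occs_eq_nil_iff cs c 0).mp hocc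
      exact hc (List.mem_of_getElem? hJc)
    | cons a rest =>
      obtain ⟨j, hj1, hj2, hj3, _⟩ := occs_head_spec hocc
      have hjJ : j = J := by
        rcases Nat.lt_trichotomy j J with h | h | h
        · exact absurd hj2 (hJmin j h)
        · exact h
        · exact absurd hJc (hj3 J h)
      simp only [List.head?_cons, Option.getD_some]
      rw [hj1, hjJ, zero_add, hJ, Int.toNat_of_nonneg hpos]

theorem findFrom_occs {cs : List Char} {c : Char} {a : Int} {rest : List Int}
    (hocc : occs cs c 0 = a :: rest) :
    PySem.Chars.findFrom cs [c] (a + 1) none = (rest.head?).getD (-1) := by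
  obtain ⟨j, hj1, hj2, hj3, hj4⟩ := occs_head_spec hocc
  have hjlen : j < cs.length := by
    rcases List.getElem?_eq_some_iff.mp hj2 with ⟨h, _⟩; exact h
  have ha : a + 1 = ((j + 1 : Nat) : Int) := by push_cast; omega
  rw [ha, PySem.Chars.findFrom_natCast cs [c] (j+1) (by omega)]
  rw [find_occs (cs.drop (j+1)) c]
  have hrest : rest = (occs (cs.drop (j+1)) c 0).map (· + ((j : Int) + 1)) := by
    rw [hj4, occs_shift]; congr 1; funext x; omega
  cases h0 : occs (cs.drop (j+1)) c 0 with
  | nil => simp [hrest, h0]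
  | cons h tt =>
    have hnn : 0 ≤ h := (occs_mem_bounds (by rw [h0]; exact List.mem_cons_self)).1
    have : ¬ ((h : Int) = -1) := by omega
    simp [hrest, h0, this]
    push_cast; ring

-- ===== the dict-building pass of B =====

theorem get?_if_contains {k : Char} (d : PySem.Dict Char Int) :
    (if d.contains k = true then d.get? k else none) = d.get? k := by
  cases hg : d.get? k <;> rw [PySem.Dict.contains_eq_isSome_get?, hg] <;> simp

theorem scan_get (cs : List Char) : ∀ (s : Int) (F S : PySem.Dict Char Int),
    (∀ c, ((PySem.List.enumerate cs s).foldl netAltScan (F, S)).1.get? c =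
        if F.contains c then F.get? c else (occs cs c s).head?) ∧
    (∀ c, ((PySem.List.enumerate cs s).foldl netAltScan (F, S)).2.get? c =
        if S.contains c then S.get? c
        else if F.contains c then (occs cs c s).head? else (occs cs c s).tail.head?) := by
  induction cs with
  | nil =>
    intro s F S
    constructor <;> intro c <;>
      simp [PySem.List.enumerate, occs, get?_if_contains] <;>
      rw [← get?_if_contains F] <;> split <;> simp [get?_if_contains]
  | cons x t ih =>
    intro s F S
    rw [PySem.List.enumerate_cons]
    simp only [List.foldl_cons]
    by_cases hF : F.contains x
    · by_cases hS : S.contains x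
      · have hstep : netAltScan (F, S) (s, x) = (F, S) := by
          simp [netAltScan, hF, hS]
        rw [hstep]
        obtain ⟨ih1, ih2⟩ := ih (s+1) F S
        refine ⟨fun c => ?_, fun c => ?_⟩
        · rw [ih1 c]
          by_cases hc : x = c
          · subst hc; simp [hF]
          · simp [occs, hc]
        · rw [ih2 c]
          by_cases hc : x = c
          · subst hc; simp [hF, hS]
          · simp [occs, hc]
      · have hstep : netAltScan (F, S) (s, x) = (F, S.insert x s) := by
          simp [netAltScan, hF, hS]
        rw [hstep]
        obtain ⟨ih1, ih2⟩ := ih (s+1) F (S.insert x s)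
        refine ⟨fun c => ?_, fun c => ?_⟩
        · rw [ih1 c]
          by_cases hc : x = c
          · subst hc; simp [hF]
          · simp [occs, hc]
        · rw [ih2 c]
          by_cases hc : x = c
          · subst hc
            simp [hS, PySem.Dict.contains_insert, PySem.Dict.get?_insert, hF, occs]
          · simp [PySem.Dict.contains_insert, PySem.Dict.get?_insert, hc, Ne.symm hc, occs]
    · have hstep : netAltScan (F, S) (s, x) = (F.insert x s, S) := by
        simp [netAltScan, hF]
      rw [hstep]
      obtain ⟨ih1, ih2⟩ := ih (s+1) (F.insert x s) S
      refine ⟨fun c => ?_, fun c => ?_⟩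
      · rw [ih1 c]
        by_cases hc : x = c
        · subst hc
          simp [hF, PySem.Dict.contains_insert, PySem.Dict.get?_insert, occs]
        · simp [PySem.Dict.contains_insert, PySem.Dict.get?_insert, hc, Ne.symm hc, occs]
      · rw [ih2 c]
        by_cases hc : x = c
        · subst hc
          simp [hF, PySem.Dict.contains_insert, PySem.Dict.get?_insert, occs]
        · simp [PySem.Dict.contains_insert, PySem.Dict.get?_insert, hc, Ne.symm hc, occs]

theorem scan_get_final (cs : List Char) (c : Char) :
    ((PySem.List.enumerate cs 0).foldl netAltScan (PySem.Dict.empty, PySem.Dict.empty)).1.get? c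
        = (occs cs c 0).head? ∧
    ((PySem.List.enumerate cs 0).foldl netAltScan (PySem.Dict.empty, PySem.Dict.empty)).2.get? c
        = (occs cs c 0).tail.head? := by
  obtain ⟨h1, h2⟩ := scan_get cs 0 PySem.Dict.empty PySem.Dict.empty
  constructor
  · rw [h1 c]; simp [PySem.Dict.contains_empty]
  · rw [h2 c]; simp [PySem.Dict.contains_empty]


-- ===== last element of A's stable sort = running >=-max =====

theorem sorted_append_singleton {α : Type} (l : List α) (x : α) (key : α → Int) :
    PySem.List.sorted (l ++ [x]) key =
      PySem.List.insertBy (fun a b => decide (key a < key b)) x (PySem.List.sorted l key) := by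
  rw [PySem.List.sorted_eq_foldl_insertBy, PySem.List.sorted_eq_foldl_insertBy, List.foldl_append]
  rfl

theorem sorted_sorted_append {α : Type} (l : List α) (x : α) (key : α → Int) :
    PySem.List.sorted (PySem.List.sorted l key ++ [x]) key = PySem.List.sorted (l ++ [x]) key := by
  rw [sorted_append_singleton, sorted_append_singleton, PySem.List.sorted_sorted]

theorem insertBy_getLast? {α : Type} (key : α → Int) (x : α) (s : List α)
    (hs : s.Pairwise (fun a b => key a ≤ key b)) :
    (PySem.List.insertBy (fun a b => decide (key a < key b)) x s).getLast? =
      some ((s.getLast?).elim x (fun g => if key x < key g then g else x)) := by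
  induction s with
  | nil => simp [PySem.List.insertBy]
  | cons y ys ih =>
    rcases List.pairwise_cons.mp hs with ⟨hy, hys⟩
    by_cases hxy : key x < key y
    · rw [show PySem.List.insertBy (fun a b => decide (key a < key b)) x (y :: ys)
            = x :: y :: ys by simp [PySem.List.insertBy, hxy]]
      rw [List.getLast?_cons_cons]
      cases hg : (y :: ys).getLast? with
      | none => simp at hg
      | some g =>
        have hgm : g ∈ y :: ys := List.mem_of_getLast? hg
        have hyg : key y ≤ key g := by
          rcases List.mem_cons.mp hgm with rfl | hgm'
          · exact le_refl _
          · exact hy g hgm'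
        simp [hg, show key x < key g from lt_of_lt_of_le hxy hyg]
    · rw [show PySem.List.insertBy (fun a b => decide (key a < key b)) x (y :: ys)
            = y :: PySem.List.insertBy (fun a b => decide (key a < key b)) x ys
          by simp [PySem.List.insertBy, hxy]]
      cases ys with
      | nil =>
        simp [PySem.List.insertBy, hxy]
      | cons z zs =>
        have hne : PySem.List.insertBy (fun a b => decide (key a < key b)) x (z :: zs) ≠ [] := by
          intro hnil
          have : x ∈ PySem.List.insertBy (fun a b => decide (key a < key b)) x (z :: zs) :=
            (PySem.List.mem_insertBy _ _ _ _).mpr (Or.inl rfl)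
          rw [hnil] at this; simp at this
        obtain ⟨w, ws, hww⟩ := List.exists_cons_of_ne_nil hne
        rw [hww, List.getLast?_cons_cons, ← hww, ih hys, List.getLast?_cons_cons]

theorem sorted_getLast?_foldl {α : Type} (key : α → Int) (l : List α) (x0 : α) :
    (PySem.List.sorted (x0 :: l) key).getLast? =
      some (l.foldl (fun b y => if key b ≤ key y then y else b) x0) := by
  induction l using List.reverseRecOn with
  | nil =>
    rw [PySem.List.sorted_eq_self_of_pairwise _ _ (by simp)]
    simp
  | append_singleton l x ih =>
    rw [show x0 :: (l ++ [x]) = (x0 :: l) ++ [x] by simp,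
        sorted_append_singleton,
        insertBy_getLast? key x _ (PySem.List.sorted_pairwise _ _),
        ih]
    simp only [Option.elim_some, List.foldl_append, List.foldl_cons, List.foldl_nil]
    rcases lt_or_ge (key x) (key (l.foldl (fun b y => if key b ≤ key y then y else b) x0)) with h | h
    · simp [h, not_le.mpr h]
    · have h' : key (l.foldl (fun b y => if key b ≤ key y then y else b) x0) ≤ key x := h
      simp [not_lt.mpr h', h']


-- ===== A's loop invariant =====

theorem net_loop (cs : List Char) (k : Nat) (hk : k ≤ cs.length) :
    (PySem.List.pyRange 0 (k : Int) 1).foldl (netStep cs) ([], [], []) =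
      (PySem.List.sorted ((cs.take k).map (candA cs)) (fun s => PySem.Chars.len s), [],
       if k = 0 then [] else
         (PySem.List.sorted ((cs.take k).map (candA cs)) (fun s => PySem.Chars.len s)).reverse) := by
  induction k with
  | zero =>
    simp only [Nat.cast_zero]
    rw [show PySem.List.pyRange 0 0 1 = [] by simp [PySem.List.pyRange]]
    simp only [List.take_zero, List.map_nil, List.foldl_nil,
      show PySem.List.sorted ([] : List (List Char)) (fun s => PySem.Chars.len s) = []
        from (PySem.List.sorted_eq_nil_iff _ _ _).mpr rfl]
    simp
  | succ k ih =>
    have hk1 : k < cs.length := by omega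
    have hsplit : PySem.List.pyRange 0 ((k : Int) + 1) 1
        = PySem.List.pyRange 0 (k : Int) 1 ++ [(k : Int)] := by
      rw [PySem.List.pyRange_one_append 0 (k : Int) ((k : Int) + 1) (by omega) (by omega)]
      congr 1
      rw [PySem.List.pyRange_one_cons (by omega)]
      simp [PySem.List.pyRange]
    rw [show ((k + 1 : Nat) : Int) = (k : Int) + 1 by push_cast; ring, hsplit,
        List.foldl_append, ih (by omega)]
    simp only [List.foldl_cons, List.foldl_nil]
    have hget : (PySem.List.pyGet? cs (k : Int)).getD ' ' = cs[k] := by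
      simp [List.getElem?_eq_getElem hk1]
    obtain ⟨a0, rest, hocc⟩ : ∃ a0 rest, occs cs cs[k] 0 = a0 :: rest := by
      cases ho : occs cs cs[k] 0 with
      | nil => exact absurd (List.getElem_mem hk1) ((occs_eq_nil_iff cs cs[k] 0).mp ho)
      | cons a r => exact ⟨a, r, rfl⟩
    have hfind : PySem.Chars.find cs [cs[k]] = a0 := by
      rw [find_occs, hocc]; rfl
    have hcand : PySem.List.slice cs (some a0) (some ((rest.head?).getD (-1) + 1))
        = candA cs cs[k] := by
      rw [candA, hocc]
      simp
    have htake : (cs.take (k + 1)).map (candA cs)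
        = (cs.take k).map (candA cs) ++ [candA cs cs[k]] := by
      rw [List.take_add_one, List.getElem?_eq_getElem hk1]
      simp only [Option.toList_some, List.map_append, List.map_cons, List.map_nil]
    simp only [netStep, hget, hfind, List.nil_append, PySem.List.pop?_zero_cons,
      Option.getD_some, findFrom_occs hocc, hcand, sorted_sorted_append,
      PySem.List.slice?_none_none_neg_one, ← htake]
    simp

-- ===== B's candidate pair agrees with A's candidate substring =====

theorem pairS_spec (cs : List Char) (c : Char) (hc : c ∈ cs) :
    candA cs c = toCand cs (pairS cs c) ∧
    PySem.Chars.len (candA cs c) = (pairS cs c).2 - (pairS cs c).1 + 1 := by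
  obtain ⟨a0, rest, hocc⟩ : ∃ a0 rest, occs cs c 0 = a0 :: rest := by
    cases ho : occs cs c 0 with
    | nil => exact absurd hc ((occs_eq_nil_iff cs c 0).mp ho)
    | cons a r => exact ⟨a, r, rfl⟩
  obtain ⟨j, hj1, hj2, hj3, hj4⟩ := occs_head_spec hocc
  have hjlen : j < cs.length := by
    rcases List.getElem?_eq_some_iff.mp hj2 with ⟨h, _⟩; exact h
  cases rest with
  | nil =>
    have hempty : candA cs c = [] := by
      rw [candA, hocc]
      simp only [List.head?_cons, Option.getD_some, List.tail_cons, List.head?_nil,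
        Option.getD_none]
      rw [PySem.List.slice_toNat cs (by omega) (by norm_num)]
      simp
    constructor
    · rw [hempty, pairS, hocc, toCand]
      rw [PySem.List.slice_toNat cs (by norm_num) (by norm_num)]
      simp
    · rw [hempty, pairS, hocc]
      simp [PySem.Chars.len_eq]
  | cons b0 rest2 =>
    have hb0 : b0 ∈ occs (cs.drop (j + 1)) c (0 + (j : Int) + 1) := by
      rw [← hj4]; exact List.mem_cons_self
    have hbb := occs_mem_bounds hb0
    rw [List.length_drop] at hbb
    constructor
    · rw [candA, hocc, pairS, hocc, toCand]
      simp
    · rw [candA, hocc, pairS, hocc]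
      simp only [List.head?_cons, Option.getD_some, List.tail_cons]
      rw [PySem.List.slice_toNat cs (by omega) (by omega)]
      simp only [PySem.Chars.len_eq, List.length_take, List.length_drop]
      push_cast
      omega

-- ===== B's scan step, rewritten through pairS =====

theorem netAltBest_eq (cs : List Char) (b : Int × Int) (c : Char) :
    netAltBest
      ((PySem.List.enumerate cs 0).foldl netAltScan (PySem.Dict.empty, PySem.Dict.empty)).1
      ((PySem.List.enumerate cs 0).foldl netAltScan (PySem.Dict.empty, PySem.Dict.empty)).2
      b c
    = if b.2 - b.1 ≤ (pairS cs c).2 - (pairS cs c).1 then pairS cs c else b := by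
  obtain ⟨hF, hS⟩ := scan_get_final cs c
  rw [netAltBest]
  cases ho : occs cs c 0 with
  | nil =>
    have : ((PySem.List.enumerate cs 0).foldl netAltScan
        (PySem.Dict.empty, PySem.Dict.empty)).2.contains c = false := by
      rw [PySem.Dict.contains_eq_isSome_get?, hS, ho]; rfl
    simp only [this, Bool.false_eq_true, if_false, pairS, ho]
  | cons a0 rest =>
    cases rest with
    | nil =>
      have : ((PySem.List.enumerate cs 0).foldl netAltScan
          (PySem.Dict.empty, PySem.Dict.empty)).2.contains c = false := by
        rw [PySem.Dict.contains_eq_isSome_get?, hS, ho]; rfl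
      simp only [this, Bool.false_eq_true, if_false, pairS, ho]
    | cons b0 rest2 =>
      have hSc : ((PySem.List.enumerate cs 0).foldl netAltScan
          (PySem.Dict.empty, PySem.Dict.empty)).2.contains c = true := by
        rw [PySem.Dict.contains_eq_isSome_get?, hS, ho]; rfl
      have hFg : ((PySem.List.enumerate cs 0).foldl netAltScan
          (PySem.Dict.empty, PySem.Dict.empty)).1.getD c 0 = a0 :=
        PySem.Dict.getD_of_get?_eq_some _ _ (by rw [hF, ho]; rfl)
      have hSg : ((PySem.List.enumerate cs 0).foldl netAltScan
          (PySem.Dict.empty, PySem.Dict.empty)).2.getD c 0 = b0 :=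
        PySem.Dict.getD_of_get?_eq_some _ _ (by rw [hS, ho]; rfl)
      simp only [hSc, if_true, hFg, hSg, pairS, ho]

-- ===== the two final scans agree =====

theorem fold_corr (cs : List Char) (t : List Char) (ht : ∀ c ∈ t, c ∈ cs)
    (p : Int × Int) (s : List Char)
    (h1 : s = toCand cs p) (h2 : PySem.Chars.len s = p.2 - p.1 + 1) :
    (t.map (candA cs)).foldl
        (fun b y => if PySem.Chars.len b ≤ PySem.Chars.len y then y else b) s
      = toCand cs (t.foldl (netAltBest
          ((PySem.List.enumerate cs 0).foldl netAltScan (PySem.Dict.empty, PySem.Dict.empty)).1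
          ((PySem.List.enumerate cs 0).foldl netAltScan (PySem.Dict.empty, PySem.Dict.empty)).2) p)
      ∧ PySem.Chars.len ((t.map (candA cs)).foldl
          (fun b y => if PySem.Chars.len b ≤ PySem.Chars.len y then y else b) s)
        = (t.foldl (netAltBest
          ((PySem.List.enumerate cs 0).foldl netAltScan (PySem.Dict.empty, PySem.Dict.empty)).1
          ((PySem.List.enumerate cs 0).foldl netAltScan (PySem.Dict.empty, PySem.Dict.empty)).2) p).2
          - (t.foldl (netAltBest
          ((PySem.List.enumerate cs 0).foldl netAltScan (PySem.Dict.empty, PySem.Dict.empty)).1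
          ((PySem.List.enumerate cs 0).foldl netAltScan (PySem.Dict.empty, PySem.Dict.empty)).2) p).1
          + 1 := by
  induction t generalizing p s with
  | nil => exact ⟨h1, h2⟩
  | cons c t' ih =>
    have hc : c ∈ cs := ht c List.mem_cons_self
    have ht' : ∀ x ∈ t', x ∈ cs := fun x hx => ht x (List.mem_cons_of_mem c hx)
    obtain ⟨hc1, hc2⟩ := pairS_spec cs c hc
    simp only [List.map_cons, List.foldl_cons, netAltBest_eq cs p c]
    by_cases hcond : p.2 - p.1 ≤ (pairS cs c).2 - (pairS cs c).1
    · have hlen : PySem.Chars.len s ≤ PySem.Chars.len (candA cs c) := by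
        rw [h2, hc2]; omega
      rw [if_pos hlen, if_pos hcond]
      exact ih ht' (pairS cs c) (candA cs c) hc1 hc2
    · have hlen : ¬ PySem.Chars.len s ≤ PySem.Chars.len (candA cs c) := by
        rw [h2, hc2]; omega
      rw [if_neg hlen, if_neg hcond]
      exact ih ht' p s h1 h2


-- ===== final assembly =====

theorem net_eq_alt (data : String) (h : data ≠ "") : net data = net_alt data := by
  have hcs : data.toList ≠ [] := by simp [h]
  obtain ⟨c1, t, hsplit⟩ := List.exists_cons_of_ne_nil hcs
  have hc1 : c1 ∈ data.toList := by rw [hsplit]; exact List.mem_cons_self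
  have ht : ∀ c ∈ t, c ∈ data.toList := by
    intro c hcmem; rw [hsplit]; exact List.mem_cons_of_mem c1 hcmem
  obtain ⟨hp1, hp2⟩ := pairS_spec data.toList c1 hc1
  have hlen0 : 0 ≤ PySem.Chars.len (candA data.toList c1) := by
    rw [PySem.Chars.len_eq]; positivity
  -- A's side
  have hmap : data.toList.map (candA data.toList)
      = candA data.toList c1 :: t.map (candA data.toList) := by
    rw [hsplit]; simp
  have hnz : data.toList.length ≠ 0 := fun h0 => hcs (List.eq_nil_of_length_eq_zero h0)
  have hA : net data
      = [String.ofList ((t.map (candA data.toList)).foldl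
          (fun b y => if PySem.Chars.len b ≤ PySem.Chars.len y then y else b)
          (candA data.toList c1))] := by
    rw [net]
    simp only [PySem.Chars.len_eq]
    rw [net_loop data.toList data.toList.length (le_refl _)]
    simp only [hnz, if_false, List.take_length]
    rw [PySem.List.slice_to _ (by norm_num)]
    have hg := sorted_getLast?_foldl (fun s => PySem.Chars.len s)
      (t.map (candA data.toList)) (candA data.toList c1)
    rw [← hmap] at hg
    have hrev : (PySem.List.sorted (data.toList.map (candA data.toList))
        (fun s => PySem.Chars.len s)).reverse.head?
        = some ((t.map (candA data.toList)).foldl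
            (fun b y => if PySem.Chars.len b ≤ PySem.Chars.len y then y else b)
            (candA data.toList c1)) := by
      rw [List.head?_reverse]; exact hg
    cases hr : (PySem.List.sorted (data.toList.map (candA data.toList))
        (fun s => PySem.Chars.len s)).reverse with
    | nil => rw [hr] at hrev; simp at hrev
    | cons g gs =>
      rw [hr] at hrev
      simp only [List.head?_cons, Option.some.injEq] at hrev
      rw [hrev]
      rfl
  -- B's side
  have hstep1 : netAltBest
      ((PySem.List.enumerate data.toList 0).foldl netAltScan (PySem.Dict.empty, PySem.Dict.empty)).1
      ((PySem.List.enumerate data.toList 0).foldl netAltScan (PySem.Dict.empty, PySem.Dict.empty)).2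
      (0, -1) c1 = pairS data.toList c1 := by
    rw [netAltBest_eq]
    rw [if_pos]
    rw [hp2] at hlen0
    simp only
    omega
  have hB : net_alt data
      = [String.ofList (toCand data.toList
          (t.foldl (netAltBest
            ((PySem.List.enumerate data.toList 0).foldl netAltScan
              (PySem.Dict.empty, PySem.Dict.empty)).1
            ((PySem.List.enumerate data.toList 0).foldl netAltScan
              (PySem.Dict.empty, PySem.Dict.empty)).2)
            (pairS data.toList c1)))] := by
    rw [net_alt]
    conv_lhs => rw [hsplit]
    rw [List.foldl_cons, ← hsplit, hstep1]
    rfl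
  obtain ⟨hcorr, _⟩ := fold_corr data.toList t ht (pairS data.toList c1)
    (candA data.toList c1) hp1 hp2
  rw [hA, hB, ← hcorr]

-- ===== VERDICT (by name: the statement is the Claim_ definition above) =====
theorem net_spec : Claim_equal_net := by
  intro data _ hpre
  exact net_eq_alt data hpre
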